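-- pv_equiv track=rewrite | github.com/konrad-jaworski/Temporal_thermal_image | helper_functions/helper_data_generator.py | extract_bscan_widths
-- ===== SOURCE A (Python) =====
-- def extract_bscan_widths(mask):
--     widths = []
--
--     for row in mask:
--         inside = False
--         start = 0
--
--         for i, val in enumerate(row):
--             if val > 0 and not inside:
--                 inside = True
--                 start = i
--
--             elif val == 0 and inside:
--                 inside = False
--                 widths.append(i - start)
--
--         if inside:
--             widths.append(len(row) - start)
--
--     return widths
-- ===== SOURCE B (Python) =====
-- def extract_bscan_widths(mask):
--     # Partition each row into zero-delimited segments (keeping original indices);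
--     # a segment containing a positive contributes width = segment_end - first_positive_index.
--     widths = []
--     for row in mask:
--         segment = []  # (index, value) pairs of the current zero-free segment
--         for i, v in enumerate(row):
--             if v == 0:
--                 pos = [j for j, x in segment if x > 0]
--                 if pos:
--                     widths.append(i - pos[0])
--                 segment = []
--             else:
--                 segment.append((i, v))
--         pos = [j for j, x in segment if x > 0]
--         if pos:
--             widths.append(len(row) - pos[0])
--     return widths
-- ===== Notes on version B (the rewrite author's own statement) =====
-- stated objective: alternative
-- what changed: Replaces A's inside/start boolean-toggle state machine with a partition-then-scan pass: each row is split into zero-delimited segments (keeping original indices) and each segment containing a positive contributes segment_end minus its first positive index.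
import Mathlib
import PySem

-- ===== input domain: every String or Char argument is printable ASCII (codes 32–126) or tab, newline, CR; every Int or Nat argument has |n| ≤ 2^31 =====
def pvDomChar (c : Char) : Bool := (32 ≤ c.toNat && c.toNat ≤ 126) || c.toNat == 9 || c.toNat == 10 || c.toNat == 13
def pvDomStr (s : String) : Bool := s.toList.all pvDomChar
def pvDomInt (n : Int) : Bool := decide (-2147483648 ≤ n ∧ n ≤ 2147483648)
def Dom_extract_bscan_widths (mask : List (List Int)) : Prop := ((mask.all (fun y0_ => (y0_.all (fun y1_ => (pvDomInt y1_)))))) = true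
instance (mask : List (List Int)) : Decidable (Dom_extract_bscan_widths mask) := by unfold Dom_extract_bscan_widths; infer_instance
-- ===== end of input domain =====

-- B replaces A's inside/start toggle state machine with a partition-into-zero-delimited-segments
-- pass (alternative decomposition, same cost); return values proved equal on all inputs.

-- ===== PORT A =====
-- inner `for i, val in enumerate(row)` loop of A; the trailing `if inside: widths.append(len(row)-start)`
-- is placed at the nil case, where the counter i equals len(row) (loops always start at i = 0).
def rowLoopA : List Int → Nat → Bool → Int → List Int → List Int
  | [], i, inside, start, ws =>
      if inside then ws ++ [(i : Int) - start] else ws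
  | v :: rest, i, inside, start, ws =>
      if v > 0 ∧ ¬(inside = true) then rowLoopA rest (i + 1) true (i : Int) ws
      else if v = 0 ∧ inside = true then rowLoopA rest (i + 1) false start (ws ++ [(i : Int) - start])
      else rowLoopA rest (i + 1) inside start ws

def extract_bscan_widths (mask : List (List Int)) : List Int :=
  mask.foldl (fun ws row => rowLoopA row 0 false 0 ws) []

-- ===== PORT B =====
-- indices of the positive entries of the current segment (the comprehension in Source B)
def posIdx (seg : List (Nat × Int)) : List Nat :=
  (seg.filter (fun p => p.2 > 0)).map (fun p => p.1)

-- inner `for i, v in enumerate(row)` loop of B; the post-loop segment flush is at the nil case,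
-- where the counter i equals len(row) (loops always start at i = 0).
def rowLoopB : List Int → Nat → List (Nat × Int) → List Int → List Int
  | [], i, seg, ws =>
      match posIdx seg with
      | [] => ws
      | j :: _ => ws ++ [(i : Int) - (j : Int)]
  | v :: rest, i, seg, ws =>
      if v = 0 then
        match posIdx seg with
        | [] => rowLoopB rest (i + 1) [] ws
        | j :: _ => rowLoopB rest (i + 1) [] (ws ++ [(i : Int) - (j : Int)])
      else rowLoopB rest (i + 1) (seg ++ [(i, v)]) ws

def extract_bscan_widths_alt (mask : List (List Int)) : List Int :=
  mask.foldl (fun ws row => rowLoopB row 0 [] ws) []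

-- ===== PRECONDITION & SPEC =====
def Spec_extract_bscan_widths (mask : List (List Int)) (out : List Int) : Prop := out = extract_bscan_widths_alt mask
instance (mask : List (List Int)) (out : List Int) : Decidable (Spec_extract_bscan_widths mask out) := by unfold Spec_extract_bscan_widths; infer_instance

-- ===== CLAIM (what is proved, stated in full; the proofs are below) =====
def Claim_equal_extract_bscan_widths : Prop := ∀ (mask : List (List Int)), Dom_extract_bscan_widths mask → Spec_extract_bscan_widths mask (extract_bscan_widths mask)

-- ===== LEMMAS AND PROOFS =====

theorem posIdx_append_pos (seg : List (Nat × Int)) (i : Nat) (v : Int) (hv : v > 0) :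
    posIdx (seg ++ [(i, v)]) = posIdx seg ++ [i] := by
  simp [posIdx, List.filter_append, hv]

theorem posIdx_append_nonpos (seg : List (Nat × Int)) (i : Nat) (v : Int) (hv : ¬ v > 0) :
    posIdx (seg ++ [(i, v)]) = posIdx seg := by
  simp [posIdx, List.filter_append, hv]

-- loop invariant: A's (inside, start) is determined by B's current segment —
-- inside ↔ the segment has a positive entry, and start is then its first positive index.
theorem rowLoop_eq (rest : List Int) : ∀ (i : Nat) (seg : List (Nat × Int)) (start : Int) (ws : List Int),
    (match posIdx seg with | [] => True | j :: _ => start = (j : Int)) →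
    rowLoopA rest i (!(posIdx seg).isEmpty) start ws = rowLoopB rest i seg ws := by
  induction rest with
  | nil =>
      intro i seg start ws hstart
      cases h : posIdx seg with
      | nil => simp [rowLoopA, rowLoopB, h]
      | cons j t =>
          rw [h] at hstart
          simp [rowLoopA, rowLoopB, h, hstart]
  | cons v rest ih =>
      intro i seg start ws hstart
      by_cases hv : v > 0
      · have hv0 : ¬ v = 0 := by omega
        cases h : posIdx seg with
        | nil =>
            -- entering a run: A sets inside, start := i; B appends (i,v) to the (positive-free) segment
            have hA : rowLoopA (v :: rest) i (!([] : List Nat).isEmpty) start ws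
                 = rowLoopA rest (i + 1) true (i : Int) ws := by
              simp [rowLoopA, hv]
            rw [hA, rowLoopB]
            simp only [hv0, ite_false]
            have := ih (i + 1) (seg ++ [(i, v)]) (i : Int) ws
              (by rw [posIdx_append_pos seg i v hv, h]; simp)
            rw [posIdx_append_pos seg i v hv, h] at this
            simpa using this
        | cons j t =>
            rw [h] at hstart
            have hstart' : start = (j : Int) := hstart
            have hA : rowLoopA (v :: rest) i (!(j :: t).isEmpty) start ws
                 = rowLoopA rest (i + 1) true start ws := by
              simp [rowLoopA, hv, hv0]
            rw [hA, rowLoopB]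
            simp only [hv0, ite_false]
            have := ih (i + 1) (seg ++ [(i, v)]) start ws
              (by rw [posIdx_append_pos seg i v hv, h]; exact hstart')
            rw [posIdx_append_pos seg i v hv, h] at this
            simpa using this
      · by_cases hv0 : v = 0
        · cases h : posIdx seg with
          | nil =>
              have hA : rowLoopA (v :: rest) i (!([] : List Nat).isEmpty) start ws
                   = rowLoopA rest (i + 1) false start ws := by
                simp [rowLoopA, hv0]
              rw [hA, rowLoopB]
              simp only [hv0, if_pos, h]
              have := ih (i + 1) ([] : List (Nat × Int)) start ws (by simp [posIdx])
              simpa [posIdx] using this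
          | cons j t =>
              rw [h] at hstart
              have hstart' : start = (j : Int) := hstart
              have hA : rowLoopA (v :: rest) i (!(j :: t).isEmpty) start ws
                   = rowLoopA rest (i + 1) false start (ws ++ [(i : Int) - start]) := by
                simp [rowLoopA, hv0]
              rw [hA, rowLoopB]
              simp only [hv0, if_pos, h]
              rw [hstart']
              have := ih (i + 1) ([] : List (Nat × Int)) ((j : Nat) : Int) (ws ++ [(i : Int) - (j : Int)]) (by simp [posIdx])
              simpa [posIdx] using this
        · -- negative value: transparent to both loops (doesn't start or end a run)
          have hA : rowLoopA (v :: rest) i (!(posIdx seg).isEmpty) start ws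
               = rowLoopA rest (i + 1) (!(posIdx seg).isEmpty) start ws := by
            rcases (posIdx seg).isEmpty.eq_false_or_eq_true with h | h <;>
              simp [rowLoopA, hv, hv0, h]
          rw [hA, rowLoopB]
          simp only [hv0, ite_false]
          have := ih (i + 1) (seg ++ [(i, v)]) start ws
            (by rw [posIdx_append_nonpos seg i v hv]; exact hstart)
          rw [posIdx_append_nonpos seg i v hv] at this
          exact this

theorem row_eq (row : List Int) (ws : List Int) : rowLoopA row 0 false 0 ws = rowLoopB row 0 [] ws := by
  have := rowLoop_eq row 0 [] 0 ws (by simp [posIdx])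
  simpa [posIdx] using this

theorem fold_eq (mask : List (List Int)) : ∀ ws,
    mask.foldl (fun ws row => rowLoopA row 0 false 0 ws) ws
    = mask.foldl (fun ws row => rowLoopB row 0 [] ws) ws := by
  induction mask with
  | nil => intro ws; rfl
  | cons r t ih => intro ws; rw [List.foldl_cons, List.foldl_cons, row_eq]; exact ih _

-- ===== VERDICT (by name: the statement is the Claim_ definition above) =====
theorem extract_bscan_widths_spec : Claim_equal_extract_bscan_widths := by
  intro mask _
  unfold Spec_extract_bscan_widths extract_bscan_widths extract_bscan_widths_alt
  exact fold_eq mask []
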